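-- pv_equiv track=rewrite | github.com/kulkarnip150/automate-stuffs-with-python | 2048_bot.py | getNextGrid
-- ===== SOURCE A (Python) =====
-- UP = 0
--
-- DOWN = 1
--
-- LEFT = 2
--
-- RIGHT = 3
--
-- def swipeRow(row):
--     prev = -1
--     i = 0
--     temp = [0, 0, 0, 0]
--     for element in row:
--         if element != 0:  # to avoid 0
--             if prev == -1:  # if element is new
--                 prev = element
--                 temp[i] = element
--                 i += 1
--             elif prev == element:  # if element is same as previous
--                 temp[i - 1] = 2 * prev
--                 prev = -1
--             else:  # if element is diffrent
--                 prev = element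
--                 temp[i] = element
--                 i += 1
--     return temp
--
-- def getNextGrid(grid, move):
--     temp = [0, 0, 0, 0, 0, 0, 0, 0, 0, 0, 0, 0, 0, 0, 0, 0]
--     if move == UP:
--         for i in range(4):
--             row = []
--             for j in range(4):
--                 row.append(grid[i + 4 * j])
--             row = swipeRow(row)
--             for j, val in enumerate(row):
--                 temp[i + 4 * j] = val
--
--     elif move == LEFT:
--         for i in range(4):
--             row = []
--             for j in range(4):
--                 row.append(grid[4 * i + j])
--             row = swipeRow(row)
--             for j, val in enumerate(row):
--                 temp[4 * i + j] = val
--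
--     elif move == DOWN:
--         for i in range(4):
--             row = []
--             for j in range(4):
--                 row.append(grid[i + 4 * (3 - j)])
--             row = swipeRow(row)
--             for j, val in enumerate(row):
--                 temp[i + 4 * (3 - j)] = val
--
--     elif move == RIGHT:
--         for i in range(4):
--             row = []
--             for j in range(4):
--                 row.append(grid[4 * i + (3 - j)])
--             row = swipeRow(row)
--             for j, val in enumerate(row):
--                 temp[4 * i + (3 - j)] = val
--
--     return temp
-- ===== SOURCE B (Python) =====
-- UP = 0
--
-- DOWN = 1
--
-- LEFT = 2
--
-- RIGHT = 3
--
-- def _lines(move):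
--     # the four cell-index lines per move, each in swipe order
--     if move == UP:
--         return [[0, 4, 8, 12], [1, 5, 9, 13], [2, 6, 10, 14], [3, 7, 11, 15]]
--     if move == DOWN:
--         return [[12, 8, 4, 0], [13, 9, 5, 1], [14, 10, 6, 2], [15, 11, 7, 3]]
--     if move == LEFT:
--         return [[0, 1, 2, 3], [4, 5, 6, 7], [8, 9, 10, 11], [12, 13, 14, 15]]
--     if move == RIGHT:
--         return [[3, 2, 1, 0], [7, 6, 5, 4], [11, 10, 9, 8], [15, 14, 13, 12]]
--     return []
--
-- def _merge(xs):
--     if len(xs) >= 2 and xs[0] == xs[1]: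
--         return [2 * xs[0]] + _merge(xs[2:])
--     if xs:
--         return [xs[0]] + _merge(xs[1:])
--     return []
--
-- def _slide(vals):
--     merged = _merge([x for x in vals if x != 0])
--     return merged + [0] * (4 - len(merged))
--
-- def getNextGrid(grid, move):
--     temp = [0] * 16
--     for line in _lines(move):
--         for k, v in zip(line, _slide([grid[k] for k in line])):
--             temp[k] = v
--     return temp
-- ===== Notes on version B (the rewrite author's own statement) =====
-- stated objective: simpler
-- what changed: Replaced the four copy-pasted direction branches by one gather/slide/scatter mechanism over per-move cell-index tables, and the sentinel-driven in-place swipe by the canonical slide (drop zeros, merge adjacent equal pairs left-to-right, pad with zeros).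
-- intended difference: On boards where some swipe line's nonzero tiles contain an adjacent pair of -1 tiles, A's prev=-1 'no pending tile' sentinel wrongly refuses to merge them and returns the tiles unmerged, while B returns the intended board with them merged into -2. — e.g. on getNextGrid([-1, -1, 0, 0, 0, 0, 0, 0, 0, 0, 0, 0, 0, 0, 0, 0], 2): A returns [-1, -1, 0, 0, 0, 0, 0, 0, 0, 0, 0, 0, 0, 0, 0, 0], B returns [-2, 0, 0, 0, 0, 0, 0, 0, 0, 0, 0, 0, 0, 0, 0, 0]
import Mathlib
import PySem

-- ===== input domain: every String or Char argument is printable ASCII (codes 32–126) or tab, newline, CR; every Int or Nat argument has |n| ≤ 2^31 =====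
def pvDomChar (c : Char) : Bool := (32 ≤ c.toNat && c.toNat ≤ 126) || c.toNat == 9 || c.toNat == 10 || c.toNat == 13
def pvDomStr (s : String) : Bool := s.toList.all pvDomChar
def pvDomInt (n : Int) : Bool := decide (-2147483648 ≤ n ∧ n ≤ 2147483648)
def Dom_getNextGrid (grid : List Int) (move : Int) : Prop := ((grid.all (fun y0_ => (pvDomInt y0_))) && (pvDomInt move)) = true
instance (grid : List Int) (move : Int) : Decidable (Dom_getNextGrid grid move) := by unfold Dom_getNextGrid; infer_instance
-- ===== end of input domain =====

-- B replaces A's four copy-pasted direction branches and sentinel-driven swipe by one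
-- gather/slide/scatter mechanism over per-move index tables with a canonical merge (simpler);
-- on lines whose nonzero tiles contain an adjacent -1,-1 pair A's prev=-1 sentinel wrongly
-- refuses the merge, and B returns the intended merged board there (see D_ below).


-- ===== PORT A =====
-- one step of swipeRow's loop; state = (prev, i, temp), exactly A's variables
def swipeStep (s : Int × Int × List Int) (element : Int) : Int × Int × List Int :=
  if element ≠ 0 then
    if s.1 = -1 then (element, s.2.1 + 1, PySem.List.pySetD s.2.2 s.2.1 element)
    else if s.1 = element then (-1, s.2.1, PySem.List.pySetD s.2.2 (s.2.1 - 1) (2 * s.1))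
    else (element, s.2.1 + 1, PySem.List.pySetD s.2.2 s.2.1 element)
  else s

def swipeRow (row : List Int) : List Int :=
  (row.foldl swipeStep (-1, 0, [0, 0, 0, 0])).2.2

-- temp[k] = v never raises here (temp has length 16, 0 ≤ k < 16), so pySetD is exact
def getNextGrid (grid : List Int) (move : Int) : List Int :=
  let temp : List Int := [0, 0, 0, 0, 0, 0, 0, 0, 0, 0, 0, 0, 0, 0, 0, 0]
  if move = 0 then
    (PySem.List.pyRange 0 4 1).foldl (fun temp i =>
      let row := (PySem.List.pyRange 0 4 1).foldl
        (fun row j => row ++ [PySem.List.pyGetD grid (i + 4 * j) 0]) ([] : List Int)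
      let row := swipeRow row
      (PySem.List.enumerate row 0).foldl
        (fun temp jv => PySem.List.pySetD temp (i + 4 * jv.1) jv.2) temp) temp
  else if move = 2 then
    (PySem.List.pyRange 0 4 1).foldl (fun temp i =>
      let row := (PySem.List.pyRange 0 4 1).foldl
        (fun row j => row ++ [PySem.List.pyGetD grid (4 * i + j) 0]) ([] : List Int)
      let row := swipeRow row
      (PySem.List.enumerate row 0).foldl
        (fun temp jv => PySem.List.pySetD temp (4 * i + jv.1) jv.2) temp) temp
  else if move = 1 then
    (PySem.List.pyRange 0 4 1).foldl (fun temp i =>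
      let row := (PySem.List.pyRange 0 4 1).foldl
        (fun row j => row ++ [PySem.List.pyGetD grid (i + 4 * (3 - j)) 0]) ([] : List Int)
      let row := swipeRow row
      (PySem.List.enumerate row 0).foldl
        (fun temp jv => PySem.List.pySetD temp (i + 4 * (3 - jv.1)) jv.2) temp) temp
  else if move = 3 then
    (PySem.List.pyRange 0 4 1).foldl (fun temp i =>
      let row := (PySem.List.pyRange 0 4 1).foldl
        (fun row j => row ++ [PySem.List.pyGetD grid (4 * i + (3 - j)) 0]) ([] : List Int)
      let row := swipeRow row
      (PySem.List.enumerate row 0).foldl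
        (fun temp jv => PySem.List.pySetD temp (4 * i + (3 - jv.1)) jv.2) temp) temp
  else temp

-- ===== PORT B =====
-- the four cell-index lines per move, each in swipe order (Source B's _lines)
def linesFor (move : Int) : List (List Int) :=
  if move = 0 then [[0, 4, 8, 12], [1, 5, 9, 13], [2, 6, 10, 14], [3, 7, 11, 15]]
  else if move = 1 then [[12, 8, 4, 0], [13, 9, 5, 1], [14, 10, 6, 2], [15, 11, 7, 3]]
  else if move = 2 then [[0, 1, 2, 3], [4, 5, 6, 7], [8, 9, 10, 11], [12, 13, 14, 15]]
  else if move = 3 then [[3, 2, 1, 0], [7, 6, 5, 4], [11, 10, 9, 8], [15, 14, 13, 12]]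
  else []

-- Source B's _merge: canonical left-to-right pair merge
def mergeList : List Int → List Int
  | x :: y :: rest => if x = y then (2 * x) :: mergeList rest else x :: mergeList (y :: rest)
  | [x] => [x]
  | [] => []

-- Source B's _slide: drop zeros, merge, pad with zeros to length 4
def slideRow (vals : List Int) : List Int :=
  let merged := mergeList (vals.filter (fun x => x ≠ 0))
  merged ++ List.replicate (4 - merged.length) 0

def getNextGrid_alt (grid : List Int) (move : Int) : List Int :=
  (linesFor move).foldl (fun temp line =>
    (line.zip (slideRow (line.map (fun k => PySem.List.pyGetD grid k 0)))).foldl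
      (fun temp kv => PySem.List.pySetD temp kv.1 kv.2) temp)
    (List.replicate 16 (0 : Int))

-- ===== PRECONDITION & SPEC =====
-- A reads grid[0..15] for a recognised move (IndexError on shorter grids); for other moves
-- A touches no grid cell and returns the zero board.
def Pre_getNextGrid (grid : List Int) (move : Int) : Prop :=
  (move = 0 ∨ move = 1 ∨ move = 2 ∨ move = 3) → 16 ≤ grid.length
instance (grid : List Int) (move : Int) : Decidable (Pre_getNextGrid grid move) := by
  unfold Pre_getNextGrid; infer_instance
def pvWitness_getNextGrid : List Int × Int :=
  ([2, 2, 0, 0, 0, 0, 0, 0, 0, 0, 0, 0, 0, 0, 0, 0], 2)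

-- cell j of swipe line c for a move: lines are columns for UP/DOWN, rows for LEFT/RIGHT
def cellAt (grid : List Int) (move : Int) (c j : Nat) : Int :=
  grid.getD (if move ≤ 1 then c + 4 * j else 4 * c + j) 0

-- On grids where some swipe line's nonzero tiles contain an adjacent -1,-1 pair, A's
-- prev=-1 sentinel (its "no pending tile" marker) wrongly refuses to merge the pair and
-- returns the tiles unmerged, while B returns the intended board with them merged to -2.
def D_getNextGrid (grid : List Int) (move : Int) : Prop :=
  0 ≤ move ∧ move ≤ 3 ∧ ∃ c < 4, ∃ j < 4, ∃ k < 4, j < k ∧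
    cellAt grid move c j = -1 ∧ cellAt grid move c k = -1 ∧
    ∀ m < 4, j < m → m < k → cellAt grid move c m = 0
instance (grid : List Int) (move : Int) : Decidable (D_getNextGrid grid move) := by
  unfold D_getNextGrid; infer_instance

def Spec_getNextGrid (grid : List Int) (move : Int) (out : List Int) : Prop :=
  ¬ D_getNextGrid grid move → out = getNextGrid_alt grid move
instance (grid : List Int) (move : Int) (out : List Int) : Decidable (Spec_getNextGrid grid move out) := by
  unfold Spec_getNextGrid; infer_instance

def pvDiffWitness_getNextGrid : List Int × Int :=
  ([-1, -1, 0, 0, 0, 0, 0, 0, 0, 0, 0, 0, 0, 0, 0, 0], 2)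
def pvDiffWitnessOut_getNextGrid : (List Int) × (List Int) :=
  ([-1, -1, 0, 0, 0, 0, 0, 0, 0, 0, 0, 0, 0, 0, 0, 0],
   [-2, 0, 0, 0, 0, 0, 0, 0, 0, 0, 0, 0, 0, 0, 0, 0])

-- ===== CLAIM (what is proved, stated in full; the proofs are below) =====
def Claim_unchanged_getNextGrid : Prop := ∀ (grid : List Int) (move : Int), Dom_getNextGrid grid move → Pre_getNextGrid grid move → Spec_getNextGrid grid move (getNextGrid grid move)
def Claim_changed_getNextGrid : Prop := Dom_getNextGrid (pvDiffWitness_getNextGrid.1) (pvDiffWitness_getNextGrid.2) ∧ Pre_getNextGrid (pvDiffWitness_getNextGrid.1) (pvDiffWitness_getNextGrid.2) ∧ D_getNextGrid (pvDiffWitness_getNextGrid.1) (pvDiffWitness_getNextGrid.2) ∧ getNextGrid (pvDiffWitness_getNextGrid.1) (pvDiffWitness_getNextGrid.2) = pvDiffWitnessOut_getNextGrid.1 ∧ getNextGrid_alt (pvDiffWitness_getNextGrid.1) (pvDiffWitness_getNextGrid.2) = pvDiffWitnessOut_getNextGrid.2 ∧ pvDiffWitnessOut_getNextGrid.1 ≠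 pvDiffWitnessOut_getNextGrid.2
def Claim_exact_getNextGrid : Prop := ∀ (grid : List Int) (move : Int), Dom_getNextGrid grid move → Pre_getNextGrid grid move → D_getNextGrid grid move → getNextGrid grid move ≠ getNextGrid_alt grid move

-- ===== LEMMAS AND PROOFS =====

-- adjacent -1,-1 pair in a list
def hasNegPair : List Int → Bool
  | x :: y :: rest => (x == -1 && y == -1) || hasNegPair (y :: rest)
  | _ => false

-- a line (a,b,c,d) holds two -1 tiles separated only by zeros (orientation-symmetric)
def negPairInLine (a b c d : Int) : Prop :=
  (a = -1 ∧ b = -1) ∨ (b = -1 ∧ c = -1) ∨ (c = -1 ∧ d = -1) ∨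
  (a = -1 ∧ b = 0 ∧ c = -1) ∨ (b = -1 ∧ c = 0 ∧ d = -1) ∨
  (a = -1 ∧ b = 0 ∧ c = 0 ∧ d = -1)

theorem negpair_to_ex (f : Nat → Int) (h : negPairInLine (f 0) (f 1) (f 2) (f 3)) :
    ∃ j < 4, ∃ k < 4, j < k ∧ f j = -1 ∧ f k = -1 ∧ ∀ m < 4, j < m → m < k → f m = 0 := by
  rcases h with ⟨h1, h2⟩ | ⟨h1, h2⟩ | ⟨h1, h2⟩ | ⟨h1, h2, h3⟩ | ⟨h1, h2, h3⟩ | ⟨h1, h2, h3, h4⟩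
  · exact ⟨0, by omega, 1, by omega, by omega, h1, h2, fun m _ ha hb => by omega⟩
  · exact ⟨1, by omega, 2, by omega, by omega, h1, h2, fun m _ ha hb => by omega⟩
  · exact ⟨2, by omega, 3, by omega, by omega, h1, h2, fun m _ ha hb => by omega⟩
  · exact ⟨0, by omega, 2, by omega, by omega, h1, h3, fun m _ ha hb => by
      interval_cases m <;> simp_all⟩
  · exact ⟨1, by omega, 3, by omega, by omega, h1, h3, fun m _ ha hb => by
      interval_cases m <;> simp_all⟩
  · exact ⟨0, by omega, 3, by omega, by omega, h1, h4, fun m _ ha hb => by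
      interval_cases m <;> simp_all⟩

theorem negpair_char (a b c d : Int) (h : ¬ negPairInLine a b c d) :
    hasNegPair (List.filter (fun x => x ≠ 0) [a, b, c, d]) = false := by
  unfold negPairInLine at h
  by_cases a0 : a = 0 <;> by_cases b0 : b = 0 <;> by_cases c0 : c = 0 <;> by_cases d0 : d = 0 <;>
    simp_all [hasNegPair] <;> tauto

theorem negpair_char_rev (a b c d : Int) (h : ¬ negPairInLine a b c d) :
    hasNegPair (List.filter (fun x => x ≠ 0) [d, c, b, a]) = false := by
  unfold negPairInLine at h
  by_cases a0 : a = 0 <;> by_cases b0 : b = 0 <;> by_cases c0 : c = 0 <;> by_cases d0 : d = 0 <;>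
    simp_all [hasNegPair] <;> tauto

-- writing a list of values into temp at consecutive indices
def writeSeq (temp : List Int) (i : Int) : List Int → List Int
  | [] => temp
  | v :: vs => writeSeq (PySem.List.pySetD temp i v) (i + 1) vs

theorem hasNegPair_cons_false {a : Int} {l : List Int} (h : hasNegPair (a :: l) = false) :
    hasNegPair l = false := by
  cases l with
  | nil => rfl
  | cons b t => simp [hasNegPair] at h ⊢; tauto

theorem hasNegPair_cons_ne {a : Int} (l : List Int) (ha : a ≠ -1) :
    hasNegPair (a :: l) = hasNegPair l := by
  cases l with
  | nil => simp [hasNegPair]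
  | cons b t => simp [hasNegPair, ha]

-- the values A's swipe loop writes, in slot order (A never merges a -1 pair)
def swipeList : List Int → List Int
  | x :: y :: rest =>
    if x = -1 then x :: swipeList (y :: rest)
    else if y = x then (2 * x) :: swipeList rest
    else x :: swipeList (y :: rest)
  | [x] => [x]
  | [] => []

theorem swipeList_length_le (L : List Int) : (swipeList L).length ≤ L.length := by
  induction L using swipeList.induct with
  | case1 y rest ih => simp [swipeList] at ih ⊢; omega
  | case2 y rest h ih => simp [swipeList, h] at ih ⊢; omega
  | case3 x y rest hx hyx ih => simp [swipeList, hx, hyx] at ih ⊢; omega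
  | case4 x => simp [swipeList]
  | case5 => simp [swipeList]

theorem swipeList_eq_mergeList (L : List Int) :
    hasNegPair L = false → swipeList L = mergeList L := by
  induction L using swipeList.induct with
  | case1 y rest ih =>
    intro h
    have hy : y ≠ -1 := by simp [hasNegPair] at h; tauto
    rw [show swipeList (-1 :: y :: rest) = -1 :: swipeList (y :: rest) by simp [swipeList],
        show mergeList (-1 :: y :: rest) = -1 :: mergeList (y :: rest) by
          simp [mergeList, Ne.symm hy],
        ih (hasNegPair_cons_false h)]
  | case2 y rest hy ih =>
    intro h
    rw [show swipeList (y :: y :: rest) = (2 * y) :: swipeList rest by simp [swipeList, hy],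
        show mergeList (y :: y :: rest) = (2 * y) :: mergeList rest by simp [mergeList],
        ih (hasNegPair_cons_false (hasNegPair_cons_false h))]
  | case3 x y rest hx hyx ih =>
    intro h
    rw [show swipeList (x :: y :: rest) = x :: swipeList (y :: rest) by
          simp [swipeList, hx, hyx],
        show mergeList (x :: y :: rest) = x :: mergeList (y :: rest) by
          simp [mergeList, Ne.symm hyx],
        ih (hasNegPair_cons_false h)]
  | case4 x => intro _; rfl
  | case5 => intro _; rfl

theorem swipeStep_zero (s : Int × Int × List Int) : swipeStep s 0 = s := by
  simp [swipeStep]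

theorem foldl_swipeStep_filter (row : List Int) (s : Int × Int × List Int) :
    row.foldl swipeStep s = (row.filter (fun x => x ≠ 0)).foldl swipeStep s := by
  induction row generalizing s with
  | nil => rfl
  | cons x xs ih =>
    by_cases hx : x = 0
    · subst hx; simp [List.foldl, swipeStep_zero, ih]
    · simp [List.filter, hx, List.foldl, ih]

theorem swipeStep_fresh (p i : Int) (t : List Int) (y : Int) (hy : y ≠ 0) (hne : y ≠ p) :
    swipeStep (p, i, t) y = swipeStep (-1, i, t) y := by
  simp only [swipeStep]
  by_cases hp : p = -1 <;> simp [hy, hp, Ne.symm hne]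

theorem mergeList_length_le (L : List Int) : (mergeList L).length ≤ L.length := by
  induction L using mergeList.induct with
  | case1 y rest ih => simp [mergeList]; omega
  | case2 x y rest h ih => simp [mergeList, h] at ih ⊢; omega
  | case3 x => simp [mergeList]
  | case4 => simp [mergeList]

theorem foldl_swipeStep_main (n : Nat) :
    ∀ (L : List Int), L.length ≤ n → (∀ x ∈ L, x ≠ 0) →
    ∀ (i : Int) (temp : List Int), 0 ≤ i →
      (L.foldl swipeStep (-1, i, temp)).2.2 = writeSeq temp i (swipeList L) := by
  induction n with
  | zero =>
    intro L hL _ i temp _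
    obtain rfl : L = [] := List.length_eq_zero_iff.mp (Nat.le_zero.mp hL)
    rfl
  | succ n ih =>
    intro L hL h0 i temp hi
    match L with
    | [] => rfl
    | [x] =>
      have hx : x ≠ 0 := h0 x (by simp)
      simp [List.foldl, swipeStep, hx, swipeList, writeSeq]
    | x :: y :: rest =>
      have hx : x ≠ 0 := h0 x (by simp)
      have hy : y ≠ 0 := h0 y (by simp)
      by_cases hx1 : x = -1
      · -- A's prev = -1 sentinel treats a -1 tile as always "new"
        have step1 : swipeStep (-1, i, temp) x = (-1, i + 1, PySem.List.pySetD temp i x) := by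
          simp [swipeStep, hx, hx1]
        rw [List.foldl_cons, step1]
        rw [ih (y :: rest) (by simp at hL ⊢; omega) (fun z hz => h0 z (by simp [hz]))
            (i + 1) _ (by omega)]
        rw [show swipeList (x :: y :: rest) = x :: swipeList (y :: rest) by
          simp [swipeList, hx1]]
        rfl
      · by_cases hxy : y = x
        · -- merge: A's two writes to slot i collapse to one write of 2*x
          have step1 : swipeStep (-1, i, temp) x = (x, i + 1, PySem.List.pySetD temp i x) := by
            simp [swipeStep, hx]
          have step2 : swipeStep (x, i + 1, PySem.List.pySetD temp i x) y
              = (-1, i + 1, PySem.List.pySetD temp i (2 * x)) := by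
            rw [hxy]
            simp [swipeStep, hx, hx1]
            simp [PySem.List.pySetD_of_nonneg, hi, List.set_set]
          rw [List.foldl_cons, List.foldl_cons, step1, step2]
          rw [ih rest (by simp at hL ⊢; omega) (fun z hz => h0 z (by simp [hz]))
              (i + 1) _ (by omega)]
          rw [show swipeList (x :: y :: rest) = (2 * x) :: swipeList rest by
            rw [hxy]; simp [swipeList, hx1]]
          rfl
        · -- distinct tiles: the pending tile x behaves like a fresh start on y :: rest
          have step1 : swipeStep (-1, i, temp) x = (x, i + 1, PySem.List.pySetD temp i x) := by
            simp [swipeStep, hx]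
          rw [List.foldl_cons, step1, List.foldl_cons,
              swipeStep_fresh x (i + 1) _ y hy hxy, ← List.foldl_cons]
          rw [ih (y :: rest) (by simp at hL ⊢; omega) (fun z hz => h0 z (by simp [hz]))
              (i + 1) _ (by omega)]
          rw [show swipeList (x :: y :: rest) = x :: swipeList (y :: rest) by
            simp [swipeList, hx1, hxy]]
          rfl

theorem exists4 (l : List Int) (h : l.length = 4) : ∃ w x y z, l = [w, x, y, z] := by
  match l, h with
  | [w, x, y, z], _ => exact ⟨w, x, y, z, rfl⟩

theorem writeSeq_pad (m : List Int) (h : m.length ≤ 4) :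
    writeSeq [0, 0, 0, 0] 0 m = m ++ List.replicate (4 - m.length) 0 := by
  match m, h with
  | [], _ => rfl
  | [a], _ => rfl
  | [a, b], _ => rfl
  | [a, b, c], _ => rfl
  | [a, b, c, d], _ => rfl

theorem row_eq (a b c d : Int)
    (h : hasNegPair (([a, b, c, d] : List Int).filter (fun x => x ≠ 0)) = false) :
    swipeRow [a, b, c, d] = slideRow [a, b, c, d] := by
  have hlen : (([a, b, c, d] : List Int).filter (fun x => x ≠ 0)).length ≤ 4 :=
    le_trans (List.length_filter_le _ _) (by simp)
  unfold swipeRow slideRow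
  rw [foldl_swipeStep_filter]
  rw [foldl_swipeStep_main 4 _ (by omega)
      (fun z hz => by simpa using (List.mem_filter.mp hz).2) 0 _ le_rfl]
  rw [swipeList_eq_mergeList _ h]
  exact writeSeq_pad _ (le_trans (mergeList_length_le _) hlen)

theorem slideRow_length (vals : List Int) (h : vals.length = 4) :
    (slideRow vals).length = 4 := by
  have h1 : (vals.filter (fun x => x ≠ 0)).length ≤ 4 :=
    le_trans (List.length_filter_le _ _) (by omega)
  have h2 := mergeList_length_le (vals.filter (fun x => x ≠ 0))
  unfold slideRow
  simp only [List.length_append, List.length_replicate]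
  omega

theorem negpair_char' (a b c d : Int) (h : negPairInLine a b c d) :
    hasNegPair (List.filter (fun x => x ≠ 0) [a, b, c, d]) = true := by
  unfold negPairInLine at h
  by_cases a0 : a = 0 <;> by_cases b0 : b = 0 <;> by_cases c0 : c = 0 <;> by_cases d0 : d = 0 <;>
    simp_all [hasNegPair] <;> tauto

theorem negPairInLine_rev (a b c d : Int) (h : negPairInLine a b c d) :
    negPairInLine d c b a := by
  unfold negPairInLine at h ⊢; tauto

theorem ex_to_negpair (f : Nat → Int)
    (h : ∃ j < 4, ∃ k < 4, j < k ∧ f j = -1 ∧ f k = -1 ∧ ∀ m < 4, j < m → m < k → f m = 0) :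
    negPairInLine (f 0) (f 1) (f 2) (f 3) := by
  obtain ⟨j, hj, k, hk, hjk, h1, h2, h3⟩ := h
  have e1 := fun (a : j < 1) (b : 1 < k) => h3 1 (by omega) a b
  have e2 := fun (a : j < 2) (b : 2 < k) => h3 2 (by omega) a b
  unfold negPairInLine
  interval_cases j <;> interval_cases k <;> simp_all <;> tauto

theorem neq_pad (n : Nat) : ∀ L : List Int, L.length ≤ n → hasNegPair L = true →
    swipeList L ++ List.replicate (n - (swipeList L).length) 0 ≠
    mergeList L ++ List.replicate (n - (mergeList L).length) 0 := by
  induction n with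
  | zero =>
    intro L hL h
    obtain rfl : L = [] := List.length_eq_zero_iff.mp (Nat.le_zero.mp hL)
    simp [hasNegPair] at h
  | succ n ih =>
    intro L hL h
    match L with
    | [] => simp [hasNegPair] at h
    | [x] => simp [hasNegPair] at h
    | x :: y :: rest =>
      by_cases hx1 : x = -1
      · by_cases hy1 : y = -1
        · -- A keeps the -1, -1 pair unmerged while B merges it into -2: heads differ
          subst hx1; subst hy1
          rw [show swipeList (-1 :: -1 :: rest) = -1 :: swipeList (-1 :: rest) by
                simp [swipeList],
              show mergeList (-1 :: -1 :: rest) = -2 :: mergeList rest by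
                simp [mergeList]]
          simp
        · have h' : hasNegPair (y :: rest) = true := by
            subst hx1; simp [hasNegPair, hy1] at h; simpa using h
          rw [show swipeList (x :: y :: rest) = x :: swipeList (y :: rest) by
                simp [swipeList, hx1],
              show mergeList (x :: y :: rest) = x :: mergeList (y :: rest) by
                subst hx1; simp [mergeList, Ne.symm hy1]]
          simpa [Nat.succ_sub_succ] using ih (y :: rest) (by simp at hL ⊢; omega) h'
      · by_cases hxy : y = x
        · have h' : hasNegPair rest = true := by
            rw [hasNegPair_cons_ne _ hx1, hasNegPair_cons_ne _ (hxy ▸ hx1)] at h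
            exact h
          rw [show swipeList (x :: y :: rest) = (2 * x) :: swipeList rest by
                rw [hxy]; simp [swipeList, hx1],
              show mergeList (x :: y :: rest) = (2 * x) :: mergeList rest by
                rw [hxy]; simp [mergeList]]
          simpa [Nat.succ_sub_succ] using ih rest (by simp at hL ⊢; omega) h'
        · have h' : hasNegPair (y :: rest) = true := by
            rw [hasNegPair_cons_ne _ hx1] at h; exact h
          rw [show swipeList (x :: y :: rest) = x :: swipeList (y :: rest) by
                simp [swipeList, hx1, hxy],
              show mergeList (x :: y :: rest) = x :: mergeList (y :: rest) by
                simp [mergeList, Ne.symm hxy]]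
          simpa [Nat.succ_sub_succ] using ih (y :: rest) (by simp at hL ⊢; omega) h'

theorem row_neq (a b c d : Int) (h : negPairInLine a b c d) :
    swipeRow [a, b, c, d] ≠ slideRow [a, b, c, d] := by
  have hlen : (([a, b, c, d] : List Int).filter (fun x => x ≠ 0)).length ≤ 4 :=
    le_trans (List.length_filter_le _ _) (by simp)
  unfold swipeRow slideRow
  rw [foldl_swipeStep_filter]
  rw [foldl_swipeStep_main 4 _ (by omega)
      (fun z hz => by simpa using (List.mem_filter.mp hz).2) 0 _ le_rfl]
  rw [writeSeq_pad _ (le_trans (swipeList_length_le _) hlen)]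
  exact neq_pad 4 _ hlen (negpair_char' a b c d h)

theorem row_neq_rev (a b c d : Int) (h : negPairInLine a b c d) :
    swipeRow [d, c, b, a] ≠ slideRow [d, c, b, a] :=
  row_neq d c b a (negPairInLine_rev a b c d h)

theorem swipeRow_length (a b c d : Int) : (swipeRow [a, b, c, d]).length = 4 := by
  have hlen : (([a, b, c, d] : List Int).filter (fun x => x ≠ 0)).length ≤ 4 :=
    le_trans (List.length_filter_le _ _) (by simp)
  have h2 := swipeList_length_le (([a, b, c, d] : List Int).filter (fun x => x ≠ 0))
  unfold swipeRow
  rw [foldl_swipeStep_filter]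
  rw [foldl_swipeStep_main 4 _ (by omega)
      (fun z hz => by simpa using (List.mem_filter.mp hz).2) 0 _ le_rfl]
  rw [writeSeq_pad _ (le_trans (swipeList_length_le _) hlen)]
  simp only [List.length_append, List.length_replicate]
  omega

theorem getNextGrid_spec : Claim_unchanged_getNextGrid := by
  intro grid move hdom hpre hnd
  show getNextGrid grid move = getNextGrid_alt grid move
  by_cases h0 : move = 0
  · subst h0
    have hnd' : ∀ c < 4, ¬ negPairInLine (cellAt grid 0 c 0) (cellAt grid 0 c 1) (cellAt grid 0 c 2) (cellAt grid 0 c 3) := by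
      intro c hc hneg
      exact hnd ⟨by norm_num, by norm_num, c, hc,
        negpair_to_ex (fun j => cellAt grid 0 c j) hneg⟩
    have e0 : hasNegPair (List.filter (fun x => x ≠ 0) [PySem.List.pyGetD grid 0 0, PySem.List.pyGetD grid 4 0, PySem.List.pyGetD grid 8 0, PySem.List.pyGetD grid 12 0]) = false := by
      simpa [cellAt, PySem.List.pyGetD_ofNat'] using negpair_char _ _ _ _ (hnd' 0 (by omega))
    have e1 : hasNegPair (List.filter (fun x => x ≠ 0) [PySem.List.pyGetD grid 1 0, PySem.List.pyGetD grid 5 0, PySem.List.pyGetD grid 9 0, PySem.List.pyGetD grid 13 0]) = false := by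
      simpa [cellAt, PySem.List.pyGetD_ofNat'] using negpair_char _ _ _ _ (hnd' 1 (by omega))
    have e2 : hasNegPair (List.filter (fun x => x ≠ 0) [PySem.List.pyGetD grid 2 0, PySem.List.pyGetD grid 6 0, PySem.List.pyGetD grid 10 0, PySem.List.pyGetD grid 14 0]) = false := by
      simpa [cellAt, PySem.List.pyGetD_ofNat'] using negpair_char _ _ _ _ (hnd' 2 (by omega))
    have e3 : hasNegPair (List.filter (fun x => x ≠ 0) [PySem.List.pyGetD grid 3 0, PySem.List.pyGetD grid 7 0, PySem.List.pyGetD grid 11 0, PySem.List.pyGetD grid 15 0]) = false := by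
      simpa [cellAt, PySem.List.pyGetD_ofNat'] using negpair_char _ _ _ _ (hnd' 3 (by omega))
    have hr : PySem.List.pyRange 0 4 1 = [0, 1, 2, 3] := by decide
    unfold getNextGrid getNextGrid_alt linesFor
    simp only [if_pos rfl, hr, List.foldl_cons, List.foldl_nil, List.nil_append,
      List.cons_append, List.map_cons, List.map_nil]
    norm_num
    rw [row_eq _ _ _ _ e0, row_eq _ _ _ _ e1, row_eq _ _ _ _ e2, row_eq _ _ _ _ e3]
    obtain ⟨a0, b0, c0, d0, hs0⟩ := exists4 (slideRow [PySem.List.pyGetD grid 0 0,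
      PySem.List.pyGetD grid 4 0, PySem.List.pyGetD grid 8 0, PySem.List.pyGetD grid 12 0])
      (slideRow_length _ rfl)
    obtain ⟨a1, b1, c1, d1, hs1⟩ := exists4 (slideRow [PySem.List.pyGetD grid 1 0,
      PySem.List.pyGetD grid 5 0, PySem.List.pyGetD grid 9 0, PySem.List.pyGetD grid 13 0])
      (slideRow_length _ rfl)
    obtain ⟨a2, b2, c2, d2, hs2⟩ := exists4 (slideRow [PySem.List.pyGetD grid 2 0,
      PySem.List.pyGetD grid 6 0, PySem.List.pyGetD grid 10 0, PySem.List.pyGetD grid 14 0])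
      (slideRow_length _ rfl)
    obtain ⟨a3, b3, c3, d3, hs3⟩ := exists4 (slideRow [PySem.List.pyGetD grid 3 0,
      PySem.List.pyGetD grid 7 0, PySem.List.pyGetD grid 11 0, PySem.List.pyGetD grid 15 0])
      (slideRow_length _ rfl)
    rw [hs0, hs1, hs2, hs3]
    simp only [PySem.List.enumerate_cons, PySem.List.enumerate_nil, List.zip_cons_cons,
      List.zip_nil_right, List.foldl_cons, List.foldl_nil]
    norm_num [List.replicate]
  by_cases h1 : move = 1
  · subst h1
    have hnd' : ∀ c < 4, ¬ negPairInLine (cellAt grid 1 c 0) (cellAt grid 1 c 1) (cellAt grid 1 c 2) (cellAt grid 1 c 3) := by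
      intro c hc hneg
      exact hnd ⟨by norm_num, by norm_num, c, hc,
        negpair_to_ex (fun j => cellAt grid 1 c j) hneg⟩
    have e0 : hasNegPair (List.filter (fun x => x ≠ 0) [PySem.List.pyGetD grid 12 0, PySem.List.pyGetD grid 8 0, PySem.List.pyGetD grid 4 0, PySem.List.pyGetD grid 0 0]) = false := by
      simpa [cellAt, PySem.List.pyGetD_ofNat'] using negpair_char_rev _ _ _ _ (hnd' 0 (by omega))
    have e1 : hasNegPair (List.filter (fun x => x ≠ 0) [PySem.List.pyGetD grid 13 0, PySem.List.pyGetD grid 9 0, PySem.List.pyGetD grid 5 0, PySem.List.pyGetD grid 1 0]) = false := by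
      simpa [cellAt, PySem.List.pyGetD_ofNat'] using negpair_char_rev _ _ _ _ (hnd' 1 (by omega))
    have e2 : hasNegPair (List.filter (fun x => x ≠ 0) [PySem.List.pyGetD grid 14 0, PySem.List.pyGetD grid 10 0, PySem.List.pyGetD grid 6 0, PySem.List.pyGetD grid 2 0]) = false := by
      simpa [cellAt, PySem.List.pyGetD_ofNat'] using negpair_char_rev _ _ _ _ (hnd' 2 (by omega))
    have e3 : hasNegPair (List.filter (fun x => x ≠ 0) [PySem.List.pyGetD grid 15 0, PySem.List.pyGetD grid 11 0, PySem.List.pyGetD grid 7 0, PySem.List.pyGetD grid 3 0]) = false := by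
      simpa [cellAt, PySem.List.pyGetD_ofNat'] using negpair_char_rev _ _ _ _ (hnd' 3 (by omega))
    have hr : PySem.List.pyRange 0 4 1 = [0, 1, 2, 3] := by decide
    unfold getNextGrid getNextGrid_alt linesFor
    simp only [hr, List.foldl_cons, List.foldl_nil, List.nil_append, List.cons_append]
    norm_num
    rw [row_eq _ _ _ _ e0, row_eq _ _ _ _ e1, row_eq _ _ _ _ e2, row_eq _ _ _ _ e3]
    obtain ⟨a0, b0, c0, d0, hs0⟩ := exists4 (slideRow [PySem.List.pyGetD grid 12 0, PySem.List.pyGetD grid 8 0, PySem.List.pyGetD grid 4 0, PySem.List.pyGetD grid 0 0])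
      (slideRow_length _ rfl)
    obtain ⟨a1, b1, c1, d1, hs1⟩ := exists4 (slideRow [PySem.List.pyGetD grid 13 0, PySem.List.pyGetD grid 9 0, PySem.List.pyGetD grid 5 0, PySem.List.pyGetD grid 1 0])
      (slideRow_length _ rfl)
    obtain ⟨a2, b2, c2, d2, hs2⟩ := exists4 (slideRow [PySem.List.pyGetD grid 14 0, PySem.List.pyGetD grid 10 0, PySem.List.pyGetD grid 6 0, PySem.List.pyGetD grid 2 0])
      (slideRow_length _ rfl)
    obtain ⟨a3, b3, c3, d3, hs3⟩ := exists4 (slideRow [PySem.List.pyGetD grid 15 0, PySem.List.pyGetD grid 11 0, PySem.List.pyGetD grid 7 0, PySem.List.pyGetD grid 3 0])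
      (slideRow_length _ rfl)
    rw [hs0, hs1, hs2, hs3]
    simp only [PySem.List.enumerate_cons, PySem.List.enumerate_nil, List.zip_cons_cons,
      List.zip_nil_right, List.foldl_cons, List.foldl_nil]
    norm_num [List.replicate]
  by_cases h2 : move = 2
  · subst h2
    have hnd' : ∀ r < 4, ¬ negPairInLine (cellAt grid 2 r 0) (cellAt grid 2 r 1) (cellAt grid 2 r 2) (cellAt grid 2 r 3) := by
      intro r hr hneg
      exact hnd ⟨by norm_num, by norm_num, r, hr,
        negpair_to_ex (fun j => cellAt grid 2 r j) hneg⟩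
    have e0 : hasNegPair (List.filter (fun x => x ≠ 0) [PySem.List.pyGetD grid 0 0, PySem.List.pyGetD grid 1 0, PySem.List.pyGetD grid 2 0, PySem.List.pyGetD grid 3 0]) = false := by
      simpa [cellAt, PySem.List.pyGetD_ofNat'] using negpair_char _ _ _ _ (hnd' 0 (by omega))
    have e1 : hasNegPair (List.filter (fun x => x ≠ 0) [PySem.List.pyGetD grid 4 0, PySem.List.pyGetD grid 5 0, PySem.List.pyGetD grid 6 0, PySem.List.pyGetD grid 7 0]) = false := by
      simpa [cellAt, PySem.List.pyGetD_ofNat'] using negpair_char _ _ _ _ (hnd' 1 (by omega))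
    have e2 : hasNegPair (List.filter (fun x => x ≠ 0) [PySem.List.pyGetD grid 8 0, PySem.List.pyGetD grid 9 0, PySem.List.pyGetD grid 10 0, PySem.List.pyGetD grid 11 0]) = false := by
      simpa [cellAt, PySem.List.pyGetD_ofNat'] using negpair_char _ _ _ _ (hnd' 2 (by omega))
    have e3 : hasNegPair (List.filter (fun x => x ≠ 0) [PySem.List.pyGetD grid 12 0, PySem.List.pyGetD grid 13 0, PySem.List.pyGetD grid 14 0, PySem.List.pyGetD grid 15 0]) = false := by
      simpa [cellAt, PySem.List.pyGetD_ofNat'] using negpair_char _ _ _ _ (hnd' 3 (by omega))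
    have hr : PySem.List.pyRange 0 4 1 = [0, 1, 2, 3] := by decide
    unfold getNextGrid getNextGrid_alt linesFor
    simp only [hr, List.foldl_cons, List.foldl_nil, List.nil_append, List.cons_append]
    norm_num
    rw [row_eq _ _ _ _ e0, row_eq _ _ _ _ e1, row_eq _ _ _ _ e2, row_eq _ _ _ _ e3]
    obtain ⟨a0, b0, c0, d0, hs0⟩ := exists4 (slideRow [PySem.List.pyGetD grid 0 0, PySem.List.pyGetD grid 1 0, PySem.List.pyGetD grid 2 0, PySem.List.pyGetD grid 3 0])
      (slideRow_length _ rfl)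
    obtain ⟨a1, b1, c1, d1, hs1⟩ := exists4 (slideRow [PySem.List.pyGetD grid 4 0, PySem.List.pyGetD grid 5 0, PySem.List.pyGetD grid 6 0, PySem.List.pyGetD grid 7 0])
      (slideRow_length _ rfl)
    obtain ⟨a2, b2, c2, d2, hs2⟩ := exists4 (slideRow [PySem.List.pyGetD grid 8 0, PySem.List.pyGetD grid 9 0, PySem.List.pyGetD grid 10 0, PySem.List.pyGetD grid 11 0])
      (slideRow_length _ rfl)
    obtain ⟨a3, b3, c3, d3, hs3⟩ := exists4 (slideRow [PySem.List.pyGetD grid 12 0, PySem.List.pyGetD grid 13 0, PySem.List.pyGetD grid 14 0, PySem.List.pyGetD grid 15 0])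
      (slideRow_length _ rfl)
    rw [hs0, hs1, hs2, hs3]
    simp only [PySem.List.enumerate_cons, PySem.List.enumerate_nil, List.zip_cons_cons,
      List.zip_nil_right, List.foldl_cons, List.foldl_nil]
    norm_num [List.replicate]
  by_cases h3 : move = 3
  · subst h3
    have hnd' : ∀ r < 4, ¬ negPairInLine (cellAt grid 3 r 0) (cellAt grid 3 r 1) (cellAt grid 3 r 2) (cellAt grid 3 r 3) := by
      intro r hr hneg
      exact hnd ⟨by norm_num, by norm_num, r, hr,
        negpair_to_ex (fun j => cellAt grid 3 r j) hneg⟩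
    have e0 : hasNegPair (List.filter (fun x => x ≠ 0) [PySem.List.pyGetD grid 3 0, PySem.List.pyGetD grid 2 0, PySem.List.pyGetD grid 1 0, PySem.List.pyGetD grid 0 0]) = false := by
      simpa [cellAt, PySem.List.pyGetD_ofNat'] using negpair_char_rev _ _ _ _ (hnd' 0 (by omega))
    have e1 : hasNegPair (List.filter (fun x => x ≠ 0) [PySem.List.pyGetD grid 7 0, PySem.List.pyGetD grid 6 0, PySem.List.pyGetD grid 5 0, PySem.List.pyGetD grid 4 0]) = false := by
      simpa [cellAt, PySem.List.pyGetD_ofNat'] using negpair_char_rev _ _ _ _ (hnd' 1 (by omega))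
    have e2 : hasNegPair (List.filter (fun x => x ≠ 0) [PySem.List.pyGetD grid 11 0, PySem.List.pyGetD grid 10 0, PySem.List.pyGetD grid 9 0, PySem.List.pyGetD grid 8 0]) = false := by
      simpa [cellAt, PySem.List.pyGetD_ofNat'] using negpair_char_rev _ _ _ _ (hnd' 2 (by omega))
    have e3 : hasNegPair (List.filter (fun x => x ≠ 0) [PySem.List.pyGetD grid 15 0, PySem.List.pyGetD grid 14 0, PySem.List.pyGetD grid 13 0, PySem.List.pyGetD grid 12 0]) = false := by
      simpa [cellAt, PySem.List.pyGetD_ofNat'] using negpair_char_rev _ _ _ _ (hnd' 3 (by omega))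
    have hr : PySem.List.pyRange 0 4 1 = [0, 1, 2, 3] := by decide
    unfold getNextGrid getNextGrid_alt linesFor
    simp only [hr, List.foldl_cons, List.foldl_nil, List.nil_append, List.cons_append]
    norm_num
    rw [row_eq _ _ _ _ e0, row_eq _ _ _ _ e1, row_eq _ _ _ _ e2, row_eq _ _ _ _ e3]
    obtain ⟨a0, b0, c0, d0, hs0⟩ := exists4 (slideRow [PySem.List.pyGetD grid 3 0, PySem.List.pyGetD grid 2 0, PySem.List.pyGetD grid 1 0, PySem.List.pyGetD grid 0 0])
      (slideRow_length _ rfl)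
    obtain ⟨a1, b1, c1, d1, hs1⟩ := exists4 (slideRow [PySem.List.pyGetD grid 7 0, PySem.List.pyGetD grid 6 0, PySem.List.pyGetD grid 5 0, PySem.List.pyGetD grid 4 0])
      (slideRow_length _ rfl)
    obtain ⟨a2, b2, c2, d2, hs2⟩ := exists4 (slideRow [PySem.List.pyGetD grid 11 0, PySem.List.pyGetD grid 10 0, PySem.List.pyGetD grid 9 0, PySem.List.pyGetD grid 8 0])
      (slideRow_length _ rfl)
    obtain ⟨a3, b3, c3, d3, hs3⟩ := exists4 (slideRow [PySem.List.pyGetD grid 15 0, PySem.List.pyGetD grid 14 0, PySem.List.pyGetD grid 13 0, PySem.List.pyGetD grid 12 0])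
      (slideRow_length _ rfl)
    rw [hs0, hs1, hs2, hs3]
    simp only [PySem.List.enumerate_cons, PySem.List.enumerate_nil, List.zip_cons_cons,
      List.zip_nil_right, List.foldl_cons, List.foldl_nil]
    norm_num [List.replicate]
  -- unrecognised move: A falls through all branches, B's line table is empty
  unfold getNextGrid getNextGrid_alt linesFor
  simp only [if_neg h0, if_neg h1, if_neg h2, if_neg h3, List.foldl_nil]
  rfl


set_option maxRecDepth 40000 in
theorem getNextGrid_changed : Claim_changed_getNextGrid := by
  unfold Claim_changed_getNextGrid; decide

set_option maxHeartbeats 1600000 in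
theorem getNextGrid_tight : Claim_exact_getNextGrid := by
  intro grid move hdom hpre hD
  obtain ⟨hma, hmb, c, hc, hex⟩ := hD
  by_cases hm : move = 0
  · subst hm
    have hneg := ex_to_negpair (fun j => cellAt grid 0 c j) hex
    have hr : PySem.List.pyRange 0 4 1 = [0, 1, 2, 3] := by decide
    unfold getNextGrid getNextGrid_alt linesFor
    simp only [hr, List.foldl_cons, List.foldl_nil, List.nil_append, List.cons_append]
    norm_num
    obtain ⟨uA00, uA01, uA02, uA03, hsA0⟩ := exists4 (swipeRow [PySem.List.pyGetD grid 0 0, PySem.List.pyGetD grid 4 0, PySem.List.pyGetD grid 8 0, PySem.List.pyGetD grid 12 0])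
      (swipeRow_length _ _ _ _)
    obtain ⟨uB00, uB01, uB02, uB03, hsB0⟩ := exists4 (slideRow [PySem.List.pyGetD grid 0 0, PySem.List.pyGetD grid 4 0, PySem.List.pyGetD grid 8 0, PySem.List.pyGetD grid 12 0])
      (slideRow_length _ rfl)
    obtain ⟨uA10, uA11, uA12, uA13, hsA1⟩ := exists4 (swipeRow [PySem.List.pyGetD grid 1 0, PySem.List.pyGetD grid 5 0, PySem.List.pyGetD grid 9 0, PySem.List.pyGetD grid 13 0])
      (swipeRow_length _ _ _ _)
    obtain ⟨uB10, uB11, uB12, uB13, hsB1⟩ := exists4 (slideRow [PySem.List.pyGetD grid 1 0, PySem.List.pyGetD grid 5 0, PySem.List.pyGetD grid 9 0, PySem.List.pyGetD grid 13 0])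
      (slideRow_length _ rfl)
    obtain ⟨uA20, uA21, uA22, uA23, hsA2⟩ := exists4 (swipeRow [PySem.List.pyGetD grid 2 0, PySem.List.pyGetD grid 6 0, PySem.List.pyGetD grid 10 0, PySem.List.pyGetD grid 14 0])
      (swipeRow_length _ _ _ _)
    obtain ⟨uB20, uB21, uB22, uB23, hsB2⟩ := exists4 (slideRow [PySem.List.pyGetD grid 2 0, PySem.List.pyGetD grid 6 0, PySem.List.pyGetD grid 10 0, PySem.List.pyGetD grid 14 0])
      (slideRow_length _ rfl)
    obtain ⟨uA30, uA31, uA32, uA33, hsA3⟩ := exists4 (swipeRow [PySem.List.pyGetD grid 3 0, PySem.List.pyGetD grid 7 0, PySem.List.pyGetD grid 11 0, PySem.List.pyGetD grid 15 0])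
      (swipeRow_length _ _ _ _)
    obtain ⟨uB30, uB31, uB32, uB33, hsB3⟩ := exists4 (slideRow [PySem.List.pyGetD grid 3 0, PySem.List.pyGetD grid 7 0, PySem.List.pyGetD grid 11 0, PySem.List.pyGetD grid 15 0])
      (slideRow_length _ rfl)
    rw [hsA0, hsA1, hsA2, hsA3, hsB0, hsB1, hsB2, hsB3]
    simp only [PySem.List.enumerate_cons, PySem.List.enumerate_nil, List.zip_cons_cons,
      List.zip_nil_right, List.foldl_cons, List.foldl_nil]
    simp only [List.replicate]
    simp only [PySem.List.pySetD_of_nonneg, Int.reduceLE, Int.reduceAdd, Int.reduceMul,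
      Int.reduceSub, Int.reduceNeg, Int.reduceToNat, List.set]
    intro heq
    obtain ⟨rfl, rfl, rfl, rfl, rfl, rfl, rfl, rfl, rfl, rfl, rfl, rfl, rfl, rfl, rfl, rfl⟩ := heq
    interval_cases c
    · have hneq : swipeRow [PySem.List.pyGetD grid 0 0, PySem.List.pyGetD grid 4 0, PySem.List.pyGetD grid 8 0, PySem.List.pyGetD grid 12 0] ≠ slideRow [PySem.List.pyGetD grid 0 0, PySem.List.pyGetD grid 4 0, PySem.List.pyGetD grid 8 0, PySem.List.pyGetD grid 12 0] := by
        simpa [cellAt, PySem.List.pyGetD_ofNat'] using row_neq _ _ _ _ hneg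
      exact hneq (by rw [hsA0, hsB0])
    · have hneq : swipeRow [PySem.List.pyGetD grid 1 0, PySem.List.pyGetD grid 5 0, PySem.List.pyGetD grid 9 0, PySem.List.pyGetD grid 13 0] ≠ slideRow [PySem.List.pyGetD grid 1 0, PySem.List.pyGetD grid 5 0, PySem.List.pyGetD grid 9 0, PySem.List.pyGetD grid 13 0] := by
        simpa [cellAt, PySem.List.pyGetD_ofNat'] using row_neq _ _ _ _ hneg
      exact hneq (by rw [hsA1, hsB1])
    · have hneq : swipeRow [PySem.List.pyGetD grid 2 0, PySem.List.pyGetD grid 6 0, PySem.List.pyGetD grid 10 0, PySem.List.pyGetD grid 14 0] ≠ slideRow [PySem.List.pyGetD grid 2 0, PySem.List.pyGetD grid 6 0, PySem.List.pyGetD grid 10 0, PySem.List.pyGetD grid 14 0] := by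
        simpa [cellAt, PySem.List.pyGetD_ofNat'] using row_neq _ _ _ _ hneg
      exact hneq (by rw [hsA2, hsB2])
    · have hneq : swipeRow [PySem.List.pyGetD grid 3 0, PySem.List.pyGetD grid 7 0, PySem.List.pyGetD grid 11 0, PySem.List.pyGetD grid 15 0] ≠ slideRow [PySem.List.pyGetD grid 3 0, PySem.List.pyGetD grid 7 0, PySem.List.pyGetD grid 11 0, PySem.List.pyGetD grid 15 0] := by
        simpa [cellAt, PySem.List.pyGetD_ofNat'] using row_neq _ _ _ _ hneg
      exact hneq (by rw [hsA3, hsB3])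
  by_cases hm : move = 1
  · subst hm
    have hneg := ex_to_negpair (fun j => cellAt grid 1 c j) hex
    have hr : PySem.List.pyRange 0 4 1 = [0, 1, 2, 3] := by decide
    unfold getNextGrid getNextGrid_alt linesFor
    simp only [hr, List.foldl_cons, List.foldl_nil, List.nil_append, List.cons_append]
    norm_num
    obtain ⟨uA00, uA01, uA02, uA03, hsA0⟩ := exists4 (swipeRow [PySem.List.pyGetD grid 12 0, PySem.List.pyGetD grid 8 0, PySem.List.pyGetD grid 4 0, PySem.List.pyGetD grid 0 0])
      (swipeRow_length _ _ _ _)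
    obtain ⟨uB00, uB01, uB02, uB03, hsB0⟩ := exists4 (slideRow [PySem.List.pyGetD grid 12 0, PySem.List.pyGetD grid 8 0, PySem.List.pyGetD grid 4 0, PySem.List.pyGetD grid 0 0])
      (slideRow_length _ rfl)
    obtain ⟨uA10, uA11, uA12, uA13, hsA1⟩ := exists4 (swipeRow [PySem.List.pyGetD grid 13 0, PySem.List.pyGetD grid 9 0, PySem.List.pyGetD grid 5 0, PySem.List.pyGetD grid 1 0])
      (swipeRow_length _ _ _ _)
    obtain ⟨uB10, uB11, uB12, uB13, hsB1⟩ := exists4 (slideRow [PySem.List.pyGetD grid 13 0, PySem.List.pyGetD grid 9 0, PySem.List.pyGetD grid 5 0, PySem.List.pyGetD grid 1 0])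
      (slideRow_length _ rfl)
    obtain ⟨uA20, uA21, uA22, uA23, hsA2⟩ := exists4 (swipeRow [PySem.List.pyGetD grid 14 0, PySem.List.pyGetD grid 10 0, PySem.List.pyGetD grid 6 0, PySem.List.pyGetD grid 2 0])
      (swipeRow_length _ _ _ _)
    obtain ⟨uB20, uB21, uB22, uB23, hsB2⟩ := exists4 (slideRow [PySem.List.pyGetD grid 14 0, PySem.List.pyGetD grid 10 0, PySem.List.pyGetD grid 6 0, PySem.List.pyGetD grid 2 0])
      (slideRow_length _ rfl)
    obtain ⟨uA30, uA31, uA32, uA33, hsA3⟩ := exists4 (swipeRow [PySem.List.pyGetD grid 15 0, PySem.List.pyGetD grid 11 0, PySem.List.pyGetD grid 7 0, PySem.List.pyGetD grid 3 0])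
      (swipeRow_length _ _ _ _)
    obtain ⟨uB30, uB31, uB32, uB33, hsB3⟩ := exists4 (slideRow [PySem.List.pyGetD grid 15 0, PySem.List.pyGetD grid 11 0, PySem.List.pyGetD grid 7 0, PySem.List.pyGetD grid 3 0])
      (slideRow_length _ rfl)
    rw [hsA0, hsA1, hsA2, hsA3, hsB0, hsB1, hsB2, hsB3]
    simp only [PySem.List.enumerate_cons, PySem.List.enumerate_nil, List.zip_cons_cons,
      List.zip_nil_right, List.foldl_cons, List.foldl_nil]
    simp only [List.replicate]
    simp only [PySem.List.pySetD_of_nonneg, Int.reduceLE, Int.reduceAdd, Int.reduceMul,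
      Int.reduceSub, Int.reduceNeg, Int.reduceToNat, List.set]
    intro heq
    obtain ⟨rfl, rfl, rfl, rfl, rfl, rfl, rfl, rfl, rfl, rfl, rfl, rfl, rfl, rfl, rfl, rfl⟩ := heq
    interval_cases c
    · have hneq : swipeRow [PySem.List.pyGetD grid 12 0, PySem.List.pyGetD grid 8 0, PySem.List.pyGetD grid 4 0, PySem.List.pyGetD grid 0 0] ≠ slideRow [PySem.List.pyGetD grid 12 0, PySem.List.pyGetD grid 8 0, PySem.List.pyGetD grid 4 0, PySem.List.pyGetD grid 0 0] := by
        simpa [cellAt, PySem.List.pyGetD_ofNat'] using row_neq_rev _ _ _ _ hneg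
      exact hneq (by rw [hsA0, hsB0])
    · have hneq : swipeRow [PySem.List.pyGetD grid 13 0, PySem.List.pyGetD grid 9 0, PySem.List.pyGetD grid 5 0, PySem.List.pyGetD grid 1 0] ≠ slideRow [PySem.List.pyGetD grid 13 0, PySem.List.pyGetD grid 9 0, PySem.List.pyGetD grid 5 0, PySem.List.pyGetD grid 1 0] := by
        simpa [cellAt, PySem.List.pyGetD_ofNat'] using row_neq_rev _ _ _ _ hneg
      exact hneq (by rw [hsA1, hsB1])
    · have hneq : swipeRow [PySem.List.pyGetD grid 14 0, PySem.List.pyGetD grid 10 0, PySem.List.pyGetD grid 6 0, PySem.List.pyGetD grid 2 0] ≠ slideRow [PySem.List.pyGetD grid 14 0, PySem.List.pyGetD grid 10 0, PySem.List.pyGetD grid 6 0, PySem.List.pyGetD grid 2 0] := by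
        simpa [cellAt, PySem.List.pyGetD_ofNat'] using row_neq_rev _ _ _ _ hneg
      exact hneq (by rw [hsA2, hsB2])
    · have hneq : swipeRow [PySem.List.pyGetD grid 15 0, PySem.List.pyGetD grid 11 0, PySem.List.pyGetD grid 7 0, PySem.List.pyGetD grid 3 0] ≠ slideRow [PySem.List.pyGetD grid 15 0, PySem.List.pyGetD grid 11 0, PySem.List.pyGetD grid 7 0, PySem.List.pyGetD grid 3 0] := by
        simpa [cellAt, PySem.List.pyGetD_ofNat'] using row_neq_rev _ _ _ _ hneg
      exact hneq (by rw [hsA3, hsB3])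
  by_cases hm : move = 2
  · subst hm
    have hneg := ex_to_negpair (fun j => cellAt grid 2 c j) hex
    have hr : PySem.List.pyRange 0 4 1 = [0, 1, 2, 3] := by decide
    unfold getNextGrid getNextGrid_alt linesFor
    simp only [hr, List.foldl_cons, List.foldl_nil, List.nil_append, List.cons_append]
    norm_num
    obtain ⟨uA00, uA01, uA02, uA03, hsA0⟩ := exists4 (swipeRow [PySem.List.pyGetD grid 0 0, PySem.List.pyGetD grid 1 0, PySem.List.pyGetD grid 2 0, PySem.List.pyGetD grid 3 0])
      (swipeRow_length _ _ _ _)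
    obtain ⟨uB00, uB01, uB02, uB03, hsB0⟩ := exists4 (slideRow [PySem.List.pyGetD grid 0 0, PySem.List.pyGetD grid 1 0, PySem.List.pyGetD grid 2 0, PySem.List.pyGetD grid 3 0])
      (slideRow_length _ rfl)
    obtain ⟨uA10, uA11, uA12, uA13, hsA1⟩ := exists4 (swipeRow [PySem.List.pyGetD grid 4 0, PySem.List.pyGetD grid 5 0, PySem.List.pyGetD grid 6 0, PySem.List.pyGetD grid 7 0])
      (swipeRow_length _ _ _ _)
    obtain ⟨uB10, uB11, uB12, uB13, hsB1⟩ := exists4 (slideRow [PySem.List.pyGetD grid 4 0, PySem.List.pyGetD grid 5 0, PySem.List.pyGetD grid 6 0, PySem.List.pyGetD grid 7 0])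
      (slideRow_length _ rfl)
    obtain ⟨uA20, uA21, uA22, uA23, hsA2⟩ := exists4 (swipeRow [PySem.List.pyGetD grid 8 0, PySem.List.pyGetD grid 9 0, PySem.List.pyGetD grid 10 0, PySem.List.pyGetD grid 11 0])
      (swipeRow_length _ _ _ _)
    obtain ⟨uB20, uB21, uB22, uB23, hsB2⟩ := exists4 (slideRow [PySem.List.pyGetD grid 8 0, PySem.List.pyGetD grid 9 0, PySem.List.pyGetD grid 10 0, PySem.List.pyGetD grid 11 0])
      (slideRow_length _ rfl)
    obtain ⟨uA30, uA31, uA32, uA33, hsA3⟩ := exists4 (swipeRow [PySem.List.pyGetD grid 12 0, PySem.List.pyGetD grid 13 0, PySem.List.pyGetD grid 14 0, PySem.List.pyGetD grid 15 0])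
      (swipeRow_length _ _ _ _)
    obtain ⟨uB30, uB31, uB32, uB33, hsB3⟩ := exists4 (slideRow [PySem.List.pyGetD grid 12 0, PySem.List.pyGetD grid 13 0, PySem.List.pyGetD grid 14 0, PySem.List.pyGetD grid 15 0])
      (slideRow_length _ rfl)
    rw [hsA0, hsA1, hsA2, hsA3, hsB0, hsB1, hsB2, hsB3]
    simp only [PySem.List.enumerate_cons, PySem.List.enumerate_nil, List.zip_cons_cons,
      List.zip_nil_right, List.foldl_cons, List.foldl_nil]
    simp only [List.replicate]
    simp only [PySem.List.pySetD_of_nonneg, Int.reduceLE, Int.reduceAdd, Int.reduceMul,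
      Int.reduceSub, Int.reduceNeg, Int.reduceToNat, List.set]
    intro heq
    obtain ⟨rfl, rfl, rfl, rfl, rfl, rfl, rfl, rfl, rfl, rfl, rfl, rfl, rfl, rfl, rfl, rfl⟩ := heq
    interval_cases c
    · have hneq : swipeRow [PySem.List.pyGetD grid 0 0, PySem.List.pyGetD grid 1 0, PySem.List.pyGetD grid 2 0, PySem.List.pyGetD grid 3 0] ≠ slideRow [PySem.List.pyGetD grid 0 0, PySem.List.pyGetD grid 1 0, PySem.List.pyGetD grid 2 0, PySem.List.pyGetD grid 3 0] := by
        simpa [cellAt, PySem.List.pyGetD_ofNat'] using row_neq _ _ _ _ hneg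
      exact hneq (by rw [hsA0, hsB0])
    · have hneq : swipeRow [PySem.List.pyGetD grid 4 0, PySem.List.pyGetD grid 5 0, PySem.List.pyGetD grid 6 0, PySem.List.pyGetD grid 7 0] ≠ slideRow [PySem.List.pyGetD grid 4 0, PySem.List.pyGetD grid 5 0, PySem.List.pyGetD grid 6 0, PySem.List.pyGetD grid 7 0] := by
        simpa [cellAt, PySem.List.pyGetD_ofNat'] using row_neq _ _ _ _ hneg
      exact hneq (by rw [hsA1, hsB1])
    · have hneq : swipeRow [PySem.List.pyGetD grid 8 0, PySem.List.pyGetD grid 9 0, PySem.List.pyGetD grid 10 0, PySem.List.pyGetD grid 11 0] ≠ slideRow [PySem.List.pyGetD grid 8 0, PySem.List.pyGetD grid 9 0, PySem.List.pyGetD grid 10 0, PySem.List.pyGetD grid 11 0] := by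
        simpa [cellAt, PySem.List.pyGetD_ofNat'] using row_neq _ _ _ _ hneg
      exact hneq (by rw [hsA2, hsB2])
    · have hneq : swipeRow [PySem.List.pyGetD grid 12 0, PySem.List.pyGetD grid 13 0, PySem.List.pyGetD grid 14 0, PySem.List.pyGetD grid 15 0] ≠ slideRow [PySem.List.pyGetD grid 12 0, PySem.List.pyGetD grid 13 0, PySem.List.pyGetD grid 14 0, PySem.List.pyGetD grid 15 0] := by
        simpa [cellAt, PySem.List.pyGetD_ofNat'] using row_neq _ _ _ _ hneg
      exact hneq (by rw [hsA3, hsB3])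
  by_cases hm : move = 3
  · subst hm
    have hneg := ex_to_negpair (fun j => cellAt grid 3 c j) hex
    have hr : PySem.List.pyRange 0 4 1 = [0, 1, 2, 3] := by decide
    unfold getNextGrid getNextGrid_alt linesFor
    simp only [hr, List.foldl_cons, List.foldl_nil, List.nil_append, List.cons_append]
    norm_num
    obtain ⟨uA00, uA01, uA02, uA03, hsA0⟩ := exists4 (swipeRow [PySem.List.pyGetD grid 3 0, PySem.List.pyGetD grid 2 0, PySem.List.pyGetD grid 1 0, PySem.List.pyGetD grid 0 0])
      (swipeRow_length _ _ _ _)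
    obtain ⟨uB00, uB01, uB02, uB03, hsB0⟩ := exists4 (slideRow [PySem.List.pyGetD grid 3 0, PySem.List.pyGetD grid 2 0, PySem.List.pyGetD grid 1 0, PySem.List.pyGetD grid 0 0])
      (slideRow_length _ rfl)
    obtain ⟨uA10, uA11, uA12, uA13, hsA1⟩ := exists4 (swipeRow [PySem.List.pyGetD grid 7 0, PySem.List.pyGetD grid 6 0, PySem.List.pyGetD grid 5 0, PySem.List.pyGetD grid 4 0])
      (swipeRow_length _ _ _ _)
    obtain ⟨uB10, uB11, uB12, uB13, hsB1⟩ := exists4 (slideRow [PySem.List.pyGetD grid 7 0, PySem.List.pyGetD grid 6 0, PySem.List.pyGetD grid 5 0, PySem.List.pyGetD grid 4 0])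
      (slideRow_length _ rfl)
    obtain ⟨uA20, uA21, uA22, uA23, hsA2⟩ := exists4 (swipeRow [PySem.List.pyGetD grid 11 0, PySem.List.pyGetD grid 10 0, PySem.List.pyGetD grid 9 0, PySem.List.pyGetD grid 8 0])
      (swipeRow_length _ _ _ _)
    obtain ⟨uB20, uB21, uB22, uB23, hsB2⟩ := exists4 (slideRow [PySem.List.pyGetD grid 11 0, PySem.List.pyGetD grid 10 0, PySem.List.pyGetD grid 9 0, PySem.List.pyGetD grid 8 0])
      (slideRow_length _ rfl)
    obtain ⟨uA30, uA31, uA32, uA33, hsA3⟩ := exists4 (swipeRow [PySem.List.pyGetD grid 15 0, PySem.List.pyGetD grid 14 0, PySem.List.pyGetD grid 13 0, PySem.List.pyGetD grid 12 0])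
      (swipeRow_length _ _ _ _)
    obtain ⟨uB30, uB31, uB32, uB33, hsB3⟩ := exists4 (slideRow [PySem.List.pyGetD grid 15 0, PySem.List.pyGetD grid 14 0, PySem.List.pyGetD grid 13 0, PySem.List.pyGetD grid 12 0])
      (slideRow_length _ rfl)
    rw [hsA0, hsA1, hsA2, hsA3, hsB0, hsB1, hsB2, hsB3]
    simp only [PySem.List.enumerate_cons, PySem.List.enumerate_nil, List.zip_cons_cons,
      List.zip_nil_right, List.foldl_cons, List.foldl_nil]
    simp only [List.replicate]
    simp only [PySem.List.pySetD_of_nonneg, Int.reduceLE, Int.reduceAdd, Int.reduceMul,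
      Int.reduceSub, Int.reduceNeg, Int.reduceToNat, List.set]
    intro heq
    obtain ⟨rfl, rfl, rfl, rfl, rfl, rfl, rfl, rfl, rfl, rfl, rfl, rfl, rfl, rfl, rfl, rfl⟩ := heq
    interval_cases c
    · have hneq : swipeRow [PySem.List.pyGetD grid 3 0, PySem.List.pyGetD grid 2 0, PySem.List.pyGetD grid 1 0, PySem.List.pyGetD grid 0 0] ≠ slideRow [PySem.List.pyGetD grid 3 0, PySem.List.pyGetD grid 2 0, PySem.List.pyGetD grid 1 0, PySem.List.pyGetD grid 0 0] := by
        simpa [cellAt, PySem.List.pyGetD_ofNat'] using row_neq_rev _ _ _ _ hneg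
      exact hneq (by rw [hsA0, hsB0])
    · have hneq : swipeRow [PySem.List.pyGetD grid 7 0, PySem.List.pyGetD grid 6 0, PySem.List.pyGetD grid 5 0, PySem.List.pyGetD grid 4 0] ≠ slideRow [PySem.List.pyGetD grid 7 0, PySem.List.pyGetD grid 6 0, PySem.List.pyGetD grid 5 0, PySem.List.pyGetD grid 4 0] := by
        simpa [cellAt, PySem.List.pyGetD_ofNat'] using row_neq_rev _ _ _ _ hneg
      exact hneq (by rw [hsA1, hsB1])
    · have hneq : swipeRow [PySem.List.pyGetD grid 11 0, PySem.List.pyGetD grid 10 0, PySem.List.pyGetD grid 9 0, PySem.List.pyGetD grid 8 0] ≠ slideRow [PySem.List.pyGetD grid 11 0, PySem.List.pyGetD grid 10 0, PySem.List.pyGetD grid 9 0, PySem.List.pyGetD grid 8 0] := by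
        simpa [cellAt, PySem.List.pyGetD_ofNat'] using row_neq_rev _ _ _ _ hneg
      exact hneq (by rw [hsA2, hsB2])
    · have hneq : swipeRow [PySem.List.pyGetD grid 15 0, PySem.List.pyGetD grid 14 0, PySem.List.pyGetD grid 13 0, PySem.List.pyGetD grid 12 0] ≠ slideRow [PySem.List.pyGetD grid 15 0, PySem.List.pyGetD grid 14 0, PySem.List.pyGetD grid 13 0, PySem.List.pyGetD grid 12 0] := by
        simpa [cellAt, PySem.List.pyGetD_ofNat'] using row_neq_rev _ _ _ _ hneg
      exact hneq (by rw [hsA3, hsB3])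
  omega
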